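-- pv_equiv track=rewrite | github.com/malcolm-smith/1405-practice | midterm-practice/03/problem-05/musa-ali/problem5.py | isvalidseries
-- ===== SOURCE A (Python) =====
-- def isvalidseries(lst, x, SUM):
-- 	# [8, 4, 8, 3, 1, 2, 7, 9] 3, 19
-- 	for i in range(len(lst[:len(lst)-(x-1)])):
-- 		total = 0
-- 		j = 0
-- 		k = i
-- 		while j < x:
-- 			total += lst[k]
-- 			k += 1
-- 			j += 1
-- 		if total > SUM:
-- 			return False
-- 	return True
-- ===== SOURCE B (Python) =====
-- def isvalidseries(lst, x, SUM):
--     n = len(lst)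
--     if n == 0 or x > n:
--         return True          # no windows to check
--     if x <= 0:
--         return SUM >= 0      # each empty window sums to 0
--     total = sum(lst[:x])
--     if total > SUM:
--         return False
--     for i in range(x, n):
--         total += lst[i] - lst[i - x]
--         if total > SUM:
--             return False
--     return True
-- ===== Notes on version B (the rewrite author's own statement) =====
-- stated objective: faster
-- what changed: B replaces A's per-window inner summation loop with a single sliding-window pass that updates the running window sum by adding the entering and subtracting the leaving element.
-- crash fix: When len(lst)+2 <= x <= 2*len(lst), A's negative slice bound len(lst)-(x-1) keeps some window starts and the inner loop runs past the list, so A raises IndexError; B returns True (no full window of size x exists). — e.g. on isvalidseries([1, 2, 3], 5, 0): A raises IndexError, B returns true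
import Mathlib
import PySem

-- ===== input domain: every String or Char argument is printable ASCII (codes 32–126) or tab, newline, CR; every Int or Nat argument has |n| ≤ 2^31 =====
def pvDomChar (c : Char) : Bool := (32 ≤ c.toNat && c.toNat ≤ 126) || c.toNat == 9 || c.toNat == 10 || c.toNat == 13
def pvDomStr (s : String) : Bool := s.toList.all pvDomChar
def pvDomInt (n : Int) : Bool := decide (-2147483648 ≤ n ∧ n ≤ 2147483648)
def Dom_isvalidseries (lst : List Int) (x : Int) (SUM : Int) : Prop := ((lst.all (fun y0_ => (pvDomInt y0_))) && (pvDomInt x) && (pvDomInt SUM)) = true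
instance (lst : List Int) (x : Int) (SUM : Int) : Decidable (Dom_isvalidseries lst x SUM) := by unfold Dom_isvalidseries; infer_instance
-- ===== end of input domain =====

-- B replaces A's per-window inner summation with one sliding-window pass (asymptotically faster).

-- ===== PORT A =====
-- inner 'while j < x' loop of A: total += lst[k]; k += 1; j += 1
def pvWhileA (lst : List Int) (x : Int) (total j k : Int) : Int :=
  if _h : j < x then
    pvWhileA lst x (total + (PySem.List.pyGet? lst k).getD 0) (j + 1) (k + 1)
  else total
termination_by (x - j).toNat
decreasing_by omega

-- outer 'for i in range(...)' loop of A with its early 'return False'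
def pvLoopA (lst : List Int) (x SUM : Int) : List Int → Bool
  | [] => true
  | i :: rest =>
      if pvWhileA lst x 0 0 i > SUM then false else pvLoopA lst x SUM rest

def isvalidseries (lst : List Int) (x : Int) (SUM : Int) : Bool :=
  pvLoopA lst x SUM
    (PySem.List.pyRange 0
      ((PySem.List.slice lst none (some ((lst.length : Int) - (x - 1)))).length) 1)

-- ===== PORT B =====
-- B's 'for i in range(x, n)' sliding loop with its early 'return False'
def pvSlideB (lst : List Int) (x SUM : Int) : Int → List Int → Bool
  | _total, [] => true
  | total, i :: rest =>
      let t := total + (PySem.List.pyGet? lst i).getD 0 - (PySem.List.pyGet? lst (i - x)).getD 0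
      if t > SUM then false else pvSlideB lst x SUM t rest

def isvalidseries_alt (lst : List Int) (x : Int) (SUM : Int) : Bool :=
  let n : Int := lst.length
  if n = 0 ∨ x > n then true
  else if x ≤ 0 then decide (0 ≤ SUM)
  else
    let total := (PySem.List.slice lst none (some x)).sum
    if total > SUM then false
    else pvSlideB lst x SUM total (PySem.List.pyRange x n 1)

-- ===== PRECONDITION & SPEC =====
-- Pre_ excludes exactly the inputs on which A raises IndexError: len+2 ≤ x ≤ 2*len,
-- where the negative slice bound len-(x-1) keeps window starts whose windows run past the list.
def Pre_isvalidseries (lst : List Int) (x : Int) (SUM : Int) : Prop :=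
  x ≤ (lst.length : Int) + 1 ∨ 2 * (lst.length : Int) < x
instance (lst : List Int) (x : Int) (SUM : Int) : Decidable (Pre_isvalidseries lst x SUM) := by unfold Pre_isvalidseries; infer_instance

def pvWitness_isvalidseries : List Int × Int × Int := ([8, 4, 8, 3, 1, 2, 7, 9], 3, 19)

-- A raises IndexError when len(lst)+2 ≤ x ≤ 2*len(lst); B returns True there (no full window of size x exists).
def Raises_isvalidseries (lst : List Int) (x : Int) (SUM : Int) : Prop :=
  (lst.length : Int) + 2 ≤ x ∧ x ≤ 2 * (lst.length : Int)
instance (lst : List Int) (x : Int) (SUM : Int) : Decidable (Raises_isvalidseries lst x SUM) := by unfold Raises_isvalidseries; infer_instance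
def pvRaiseWitness_isvalidseries : List Int × Int × Int := ([1, 2, 3], 5, 0)
def pvRaiseWitnessOut_isvalidseries : Bool := true

def Spec_isvalidseries (lst : List Int) (x : Int) (SUM : Int) (out : Bool) : Prop := out = isvalidseries_alt lst x SUM
instance (lst : List Int) (x : Int) (SUM : Int) (out : Bool) : Decidable (Spec_isvalidseries lst x SUM out) := by unfold Spec_isvalidseries; infer_instance

-- ===== CLAIM (what is proved, stated in full; the proofs are below) =====
def Claim_equal_isvalidseries : Prop := ∀ (lst : List Int) (x : Int) (SUM : Int), Dom_isvalidseries lst x SUM → Pre_isvalidseries lst x SUM → Spec_isvalidseries lst x SUM (isvalidseries lst x SUM)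
def Claim_raises_isvalidseries : Prop := (∀ (lst : List Int) (x : Int) (SUM : Int), Dom_isvalidseries lst x SUM → Raises_isvalidseries lst x SUM → ¬ Pre_isvalidseries lst x SUM) ∧ (Dom_isvalidseries (pvRaiseWitness_isvalidseries.1) (pvRaiseWitness_isvalidseries.2.1) (pvRaiseWitness_isvalidseries.2.2) ∧ Raises_isvalidseries (pvRaiseWitness_isvalidseries.1) (pvRaiseWitness_isvalidseries.2.1) (pvRaiseWitness_isvalidseries.2.2) ∧ isvalidseries_alt (pvRaiseWitness_isvalidseries.1) (pvRaiseWitness_isvalidseries.2.1) (pvRaiseWitness_isvalidseries.2.2) = pvRaiseWitnessOut_isvalidseries)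

-- ===== LEMMAS AND PROOFS =====

-- sum of m consecutive elements (via Python indexing with default) starting at k
def pvWsum (lst : List Int) : Nat → Int → Int
  | 0, _ => 0
  | m + 1, k => (PySem.List.pyGet? lst k).getD 0 + pvWsum lst m (k + 1)

theorem pvWhileA_eq (lst : List Int) (x : Int) :
    ∀ (m : Nat) (t j k : Int), (x - j).toNat = m →
      pvWhileA lst x t j k = t + pvWsum lst m k := by
  intro m
  induction m with
  | zero => intro t j k h; rw [pvWhileA]; simp [pvWsum]; omega
  | succ m ih =>
      intro t j k h
      rw [pvWhileA]
      have hj : j < x := by omega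
      simp only [hj, dif_pos]
      rw [ih _ _ _ (by omega)]
      show _ = t + ((PySem.List.pyGet? lst k).getD 0 + pvWsum lst m (k + 1))
      ring

theorem pvWsum_succ (lst : List Int) :
    ∀ (m : Nat) (k : Int), pvWsum lst (m + 1) k = pvWsum lst m k + (PySem.List.pyGet? lst (k + m)).getD 0 := by
  intro m
  induction m with
  | zero => intro k; simp [pvWsum]
  | succ m ih =>
      intro k
      have h1 : pvWsum lst (m + 1 + 1) k = (PySem.List.pyGet? lst k).getD 0 + pvWsum lst (m + 1) (k + 1) := rfl
      have h2 : pvWsum lst (m + 1) k = (PySem.List.pyGet? lst k).getD 0 + pvWsum lst m (k + 1) := rfl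
      have h3 := ih (k + 1)
      have h4 : k + 1 + (m : Int) = k + ((m : Nat) + 1 : Int) := by push_cast; ring
      rw [h4] at h3
      rw [h1, h3, h2]
      push_cast
      ring

theorem pvWsum_slide (lst : List Int) (m : Nat) (k : Int) :
    pvWsum lst m (k + 1) = pvWsum lst m k + (PySem.List.pyGet? lst (k + m)).getD 0 - (PySem.List.pyGet? lst k).getD 0 := by
  have h1 : pvWsum lst (m + 1) k = (PySem.List.pyGet? lst k).getD 0 + pvWsum lst m (k + 1) := rfl
  have h2 := pvWsum_succ lst m k
  omega

theorem pvLoopA_eq (lst : List Int) (x SUM : Int) :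
    ∀ is : List Int, pvLoopA lst x SUM is = true ↔ ∀ i ∈ is, pvWhileA lst x 0 0 i ≤ SUM := by
  intro is
  induction is with
  | nil => simp [pvLoopA]
  | cons i rest ih =>
      simp only [pvLoopA]
      by_cases h : pvWhileA lst x 0 0 i > SUM
      · rw [if_pos h]
        simp only [Bool.false_eq_true, false_iff]
        intro hall
        exact absurd (hall i (by simp)) (by omega)
      · rw [if_neg h, ih]
        simp only [List.mem_cons]
        constructor
        · rintro hall j (rfl | hj)
          · omega
          · exact hall j hj
        · intro hall j hj
          exact hall j (Or.inr hj)

-- B's sliding loop checks 'all remaining windows ≤ SUM'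
theorem pvSlideB_eq (lst : List Int) (x SUM : Int) (hx : 0 ≤ x) :
    ∀ (c : Nat) (a : Int), (pvSlideB lst x SUM (pvWsum lst x.toNat (a - x)) (PySem.List.pyRange a (a + c) 1) = true
      ↔ ∀ j : Nat, j < c → pvWsum lst x.toNat (a - x + 1 + j) ≤ SUM) := by
  intro c
  induction c with
  | zero =>
      intro a
      rw [PySem.List.pyRange_one_eq_nil (by omega)]
      constructor
      · intro _ j hj
        exact absurd hj (by omega)
      · intro _
        rfl
  | succ c ih =>
      intro a
      rw [PySem.List.pyRange_one_cons (by omega)]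
      simp only [pvSlideB]
      have hslide : pvWsum lst x.toNat (a - x) + (PySem.List.pyGet? lst a).getD 0 - (PySem.List.pyGet? lst (a - x)).getD 0
          = pvWsum lst x.toNat (a - x + 1) := by
        have hs := pvWsum_slide lst x.toNat (a - x)
        have he : a - x + (x.toNat : Int) = a := by omega
        rw [he] at hs
        omega
      rw [hslide]
      by_cases h : pvWsum lst x.toNat (a - x + 1) > SUM
      · rw [if_pos h]
        simp only [Bool.false_eq_true, false_iff]
        intro hall
        have := hall 0 (by omega)
        simp only [Nat.cast_zero, add_zero] at this
        omega
      · rw [if_neg h]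
        have hc2 : a + ((c + 1 : Nat) : Int) = a + 1 + (c : Int) := by push_cast; ring
        rw [hc2]
        have hih := ih (a + 1)
        have he2 : a + 1 - x = a - x + 1 := by ring
        rw [he2] at hih
        rw [hih]
        constructor
        · intro hall j hj
          rcases Nat.eq_zero_or_pos j with hj0 | hjp
          · subst hj0
            simpa using (by omega : pvWsum lst x.toNat (a - x + 1) ≤ SUM)
          · have hstep := hall (j - 1) (by omega)
            have hcast : a - x + 1 + 1 + ((j - 1 : Nat) : Int) = a - x + 1 + (j : Int) := by
              have hj1 : ((j - 1 : Nat) : Int) = (j : Int) - 1 := by omega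
              rw [hj1]; ring
            rw [hcast] at hstep
            exact hstep
        · intro hall j hj
          have hstep := hall (j + 1) (by omega)
          have hcast : a - x + 1 + ((j + 1 : Nat) : Int) = a - x + 1 + 1 + (j : Int) := by
            push_cast; ring
          rw [hcast] at hstep
          exact hstep

-- the first window, sum(lst[:x]), as pvWsum
theorem pvWsum_take_aux (lst : List Int) :
    ∀ (m k : Nat), k + m ≤ lst.length → ((lst.drop k).take m).sum = pvWsum lst m (k : Int) := by
  intro m
  induction m with
  | zero => intro k h; simp [pvWsum]
  | succ m ih =>
      intro k h
      have hk : k < lst.length := by omega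
      rw [List.drop_eq_getElem_cons hk]
      simp only [List.take_succ_cons, List.sum_cons]
      rw [ih (k + 1) (by omega)]
      have hm : pvWsum lst (m + 1) (k : Int) = (PySem.List.pyGet? lst (k : Int)).getD 0 + pvWsum lst m ((k : Int) + 1) := rfl
      rw [hm, PySem.List.pyGet?_ofNat lst k hk]
      have hc : ((k + 1 : Nat) : Int) = (k : Int) + 1 := by push_cast; ring
      rw [hc]
      rfl

theorem pvWsum_take (lst : List Int) (m : Nat) (hm : m ≤ lst.length) :
    (lst.take m).sum = pvWsum lst m 0 := by
  have := pvWsum_take_aux lst m 0 (by omega)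
  simpa using this

theorem isvalidseries_eq_all (lst : List Int) (x SUM : Int) (hx1 : 1 ≤ x) (hxn : x ≤ (lst.length : Int)) :
    isvalidseries lst x SUM = true ↔ ∀ i ∈ PySem.List.pyRange 0 ((lst.length : Int) - x + 1) 1, pvWsum lst x.toNat i ≤ SUM := by
  unfold isvalidseries
  have hstop : (lst.length : Int) - (x - 1) = (lst.length : Int) - x + 1 := by ring
  rw [hstop]
  rw [PySem.List.slice_to lst (by omega : (0:Int) ≤ (lst.length : Int) - x + 1)]
  have hlen : ((List.take ((lst.length : Int) - x + 1).toNat lst).length : Int) = (lst.length : Int) - x + 1 := by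
    simp; omega
  rw [hlen, pvLoopA_eq]
  constructor
  · intro hall i hi
    have := hall i hi
    rwa [pvWhileA_eq lst x x.toNat 0 0 i (by omega), zero_add] at this
  · intro hall i hi
    rw [pvWhileA_eq lst x x.toNat 0 0 i (by omega), zero_add]
    exact hall i hi

-- ===== VERDICT (by name: the statement is the Claim_ definition above) =====
theorem isvalidseries_spec : Claim_equal_isvalidseries := by
  unfold Claim_equal_isvalidseries
  intro lst x SUM _hdom hpre
  unfold Spec_isvalidseries
  unfold Pre_isvalidseries at hpre
  by_cases hn0 : lst.length = 0
  · have hl : lst = [] := List.length_eq_zero_iff.mp hn0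
    subst hl
    unfold isvalidseries isvalidseries_alt
    simp [PySem.List.slice, PySem.List.pyRange_one_eq_nil, pvLoopA]
  · by_cases hx0 : x ≤ 0
    · -- x ≤ 0: slice keeps all of lst, every window sum is 0
      rw [Bool.eq_iff_iff]
      unfold isvalidseries
      rw [PySem.List.slice_to lst (by omega : (0:Int) ≤ (lst.length : Int) - (x - 1))]
      have htk : ((List.take ((lst.length : Int) - (x - 1)).toNat lst).length : Int) = (lst.length : Int) := by
        simp; omega
      rw [htk, pvLoopA_eq]
      have hwin : ∀ i : Int, pvWhileA lst x 0 0 i = 0 := by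
        intro i
        rw [pvWhileA, dif_neg (by omega : ¬ (0:Int) < x)]
      unfold isvalidseries_alt
      have hcnot : ¬((lst.length : Int) = 0 ∨ x > (lst.length : Int)) := by omega
      rw [if_neg hcnot, if_pos hx0, decide_eq_true_iff]
      constructor
      · intro hall
        have h0 : (0:Int) ∈ PySem.List.pyRange 0 (lst.length : Int) 1 := by
          rw [PySem.List.mem_pyRange_one]; omega
        have := hall 0 h0
        rw [hwin] at this
        omega
      · intro hS i _
        rw [hwin]
        omega
    · by_cases hbig : (lst.length : Int) < x
      · -- x > n (and Pre_): no window, both true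
        unfold isvalidseries_alt
        rw [if_pos (Or.inr hbig : (lst.length : Int) = 0 ∨ x > (lst.length : Int))]
        unfold isvalidseries
        have hcase : x = (lst.length : Int) + 1 ∨ 2 * (lst.length : Int) < x := by
          rcases hpre with h | h
          · left; omega
          · right; exact h
        rcases hcase with h1 | h2
        · have hz : (lst.length : Int) - (x - 1) = 0 := by omega
          rw [hz, PySem.List.slice_to lst (by omega)]
          simp [pvLoopA, PySem.List.pyRange_one_eq_nil]
        · -- x ≥ 2n+1: stop ≤ -n, negative slice clamps to []
          have hkpos : 0 < (x - 1 - (lst.length : Int)).toNat := by omega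
          have hsl := PySem.List.slice_to_neg_natCast lst ((x - 1 - (lst.length : Int)).toNat) hkpos
          have he : -(((x - 1 - (lst.length : Int)).toNat : Nat) : Int) = (lst.length : Int) - (x - 1) := by omega
          rw [he] at hsl
          have hz : lst.length - (x - 1 - (lst.length : Int)).toNat = 0 := by omega
          rw [hz, List.take_zero] at hsl
          rw [hsl]
          simp [pvLoopA, PySem.List.pyRange_one_eq_nil]
      · -- main case 1 ≤ x ≤ n
        have hx1 : 1 ≤ x := by omega
        have hxn : x ≤ (lst.length : Int) := by omega
        rw [Bool.eq_iff_iff]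
        rw [isvalidseries_eq_all lst x SUM hx1 hxn]
        unfold isvalidseries_alt
        have hcnot : ¬((lst.length : Int) = 0 ∨ x > (lst.length : Int)) := by omega
        rw [if_neg hcnot, if_neg hx0]
        rw [PySem.List.slice_to lst (by omega : (0:Int) ≤ x), pvWsum_take lst x.toNat (by omega)]
        have hfold := pvSlideB_eq lst x SUM (by omega) ((lst.length : Int) - x).toNat x
        have hax : x + ((((lst.length : Int) - x).toNat : Nat) : Int) = (lst.length : Int) := by omega
        rw [hax, (by ring : x - x = (0:Int))] at hfold
        by_cases hfirst : pvWsum lst x.toNat 0 > SUM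
        · rw [if_pos hfirst]
          simp only [Bool.false_eq_true, iff_false]
          intro hall
          have h0 : (0:Int) ∈ PySem.List.pyRange 0 ((lst.length : Int) - x + 1) 1 := by
            rw [PySem.List.mem_pyRange_one]; omega
          exact absurd (hall 0 h0) (by omega)
        · rw [if_neg hfirst, hfold]
          constructor
          · intro hall j hj
            have hm : (0:Int) + 1 + (j : Int) ∈ PySem.List.pyRange 0 ((lst.length : Int) - x + 1) 1 := by
              rw [PySem.List.mem_pyRange_one]
              constructor
              · omega
              · omega
            exact hall _ hm
          · intro hall i hi
            rw [PySem.List.mem_pyRange_one] at hi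
            by_cases hi0 : i = 0
            · subst hi0
              omega
            · have hj2 : (i - 1).toNat < ((lst.length : Int) - x).toNat := by omega
              have := hall (i - 1).toNat hj2
              have hc : (0:Int) + 1 + (((i - 1).toNat : Nat) : Int) = i := by omega
              rw [hc] at this
              exact this

theorem isvalidseries_raises : Claim_raises_isvalidseries := by
  unfold Claim_raises_isvalidseries
  constructor
  · intro lst x SUM _hdom hr
    unfold Raises_isvalidseries at hr
    unfold Pre_isvalidseries
    omega
  · exact ⟨by decide, by decide, by decide⟩

-- self-check: the raise witness lies inside Raises_ and hence outside Pre_ (via isvalidseries_raises)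
theorem pvRaiseWitness_isvalidseries_ok :
    Raises_isvalidseries [1, 2, 3] 5 0 ∧ ¬ Pre_isvalidseries [1, 2, 3] 5 0 :=
  ⟨by decide, isvalidseries_raises.1 [1, 2, 3] 5 0 (by decide) (by decide)⟩
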